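-- pv_equiv track=rewrite | github.com/SunsetBrightGorgeousAgain/LeetCode | LeetCode/editor/cn/leetcode/editor/cn/[LCP 22]黑白方格画.py | paintingPlan
-- ===== SOURCE A (Python) =====
-- def paintingPlan(n: int, k: int) -> int:
--     # j横,l竖
--     j = 0
--
--     if k < n:
--         return 0
--     elif k == n*n:
--         return 1
--     else:
--         # 横竖最大也就是为N，有一个最大也是N-1
--         # 0< j < n-1
--         result = 0
--         while 0<=j<=n:
--             for i in range(0,n):
--                 if j*n+i*n-i*j == k:
--                     result += 1
--                     break
--             j += 1
--
--         return result*2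
-- ===== SOURCE B (Python) =====
-- def paintingPlan(n: int, k: int) -> int:
--     if k < n:
--         return 0
--     if k == n * n:
--         return 1
--     result = 0
--     for j in range(0, n + 1):
--         d = n - j
--         if d == 0:
--             continue
--         num = k - j * n
--         if num % d == 0 and 0 <= num // d < n:
--             result += 1
--     return result * 2
-- ===== Notes on version B (the rewrite author's own statement) =====
-- stated objective: alternative
-- what changed: For each row count j, B decides existence of the column count i by solving the equation j*n + i*(n-j) = k directly (divisibility and range check on (k-j*n)//(n-j)) instead of A's inner scan over all i.
import Mathlib
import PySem

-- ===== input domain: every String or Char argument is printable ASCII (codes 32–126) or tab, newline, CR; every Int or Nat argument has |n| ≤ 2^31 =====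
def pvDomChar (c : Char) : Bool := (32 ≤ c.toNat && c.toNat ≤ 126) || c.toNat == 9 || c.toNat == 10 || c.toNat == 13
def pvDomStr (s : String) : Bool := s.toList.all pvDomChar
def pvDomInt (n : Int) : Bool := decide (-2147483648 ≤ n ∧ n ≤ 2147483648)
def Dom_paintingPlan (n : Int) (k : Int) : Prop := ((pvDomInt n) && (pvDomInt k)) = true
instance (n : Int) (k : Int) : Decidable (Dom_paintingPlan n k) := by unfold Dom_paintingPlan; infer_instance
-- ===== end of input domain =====

-- B decides, for each j, whether a column count i exists by solving j*n + i*(n-j) = k directly (divisibility + range check) instead of A's inner scan over i.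

-- ===== PORT A =====
-- inner 'for i in range(0,n): if j*n+i*n-i*j == k: result += 1; break' — returns the increment (1 at first hit, else 0)
def pvInnerA (n k j : Int) : List Int → Int
  | [] => 0
  | i :: rest => if j*n + i*n - i*j = k then 1 else pvInnerA n k j rest

-- the 'while 0<=j<=n' loop, with enough fuel for all its iterations
def pvWhileA (n k : Int) : Nat → Int → Int → Int
  | 0, _, result => result
  | fuel+1, j, result =>
    if 0 ≤ j ∧ j ≤ n then
      pvWhileA n k fuel (j+1) (result + pvInnerA n k j (PySem.List.pyRange 0 n 1))
    else result

def paintingPlan (n : Int) (k : Int) : Int :=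
  if k < n then 0
  else if k = n*n then 1
  else pvWhileA n k ((n+1).toNat + 1) 0 0 * 2

-- ===== PORT B =====
-- body of B's 'for j in range(0, n+1)': solve for i directly
def pvStepB (n k : Int) (result j : Int) : Int :=
  let d := n - j
  if d = 0 then result
  else
    let num := k - j*n
    if PySem.Int.mod num d = 0 ∧ 0 ≤ PySem.Int.floordiv num d ∧ PySem.Int.floordiv num d < n
    then result + 1 else result

def paintingPlan_alt (n : Int) (k : Int) : Int :=
  if k < n then 0
  else if k = n*n then 1
  else ((PySem.List.pyRange 0 (n+1) 1).foldl (pvStepB n k) 0) * 2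

-- ===== PRECONDITION & SPEC =====
def Spec_paintingPlan (n : Int) (k : Int) (out : Int) : Prop := out = paintingPlan_alt n k
instance (n : Int) (k : Int) (out : Int) : Decidable (Spec_paintingPlan n k out) := by unfold Spec_paintingPlan; infer_instance

-- ===== CLAIM (what is proved, stated in full; the proofs are below) =====
def Claim_equal_paintingPlan : Prop := ∀ (n : Int) (k : Int), Dom_paintingPlan n k → Spec_paintingPlan n k (paintingPlan n k)

-- ===== LEMMAS AND PROOFS =====

-- A's inner loop finds whether some i in the list satisfies the equation
lemma pvInnerA_eq_exists (n k j : Int) (L : List Int) :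
    pvInnerA n k j L = if (∃ i ∈ L, j*n + i*n - i*j = k) then 1 else 0 := by
  induction L with
  | nil => simp [pvInnerA]
  | cons i rest ih =>
      simp only [pvInnerA, ih]
      by_cases h : j*n + i*n - i*j = k
      · simp [h]
      · simp [h]

-- one loop step of A equals one fold step of B (inside the loop, with k ≠ n*n)
lemma step_eq (n k j acc : Int) (hj0 : 0 ≤ j) (hjn : j ≤ n) (hk : k ≠ n*n) :
    pvStepB n k acc j = acc + pvInnerA n k j (PySem.List.pyRange 0 n 1) := by
  rw [pvInnerA_eq_exists]
  simp only [pvStepB]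
  by_cases hd : n - j = 0
  · -- j = n: the equation says k = n*n, which this branch excludes
    have hjn' : j = n := by omega
    have hne : ¬ (∃ i ∈ PySem.List.pyRange 0 n 1, j*n + i*n - i*j = k) := by
      rintro ⟨i, _, heq⟩
      subst hjn'
      exact hk (by linarith)
    rw [if_pos hd, if_neg hne, add_zero]
  · have hdpos : 0 < n - j := by omega
    have hiff : (∃ i ∈ PySem.List.pyRange 0 n 1, j*n + i*n - i*j = k) ↔
        (PySem.Int.mod (k - j*n) (n - j) = 0 ∧ 0 ≤ PySem.Int.floordiv (k - j*n) (n - j) ∧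
         PySem.Int.floordiv (k - j*n) (n - j) < n) := by
      constructor
      · rintro ⟨i, hmem, heq⟩
        rw [PySem.List.mem_pyRange_one] at hmem
        have hnum : k - j*n = (n - j) * i := by linear_combination -heq
        have hdvd : (n - j) ∣ (k - j*n) := ⟨i, hnum⟩
        have hfd : PySem.Int.floordiv (k - j*n) (n - j) = i := by
          rw [PySem.Int.floordiv_eq_iff_of_pos hdpos]
          constructor <;> nlinarith
        refine ⟨(PySem.Int.mod_eq_zero_iff_dvd _ _).mpr hdvd, ?_, ?_⟩ <;> rw [hfd]
        · exact hmem.1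
        · exact hmem.2
      · rintro ⟨hmod, hlo, hhi⟩
        obtain ⟨c, hc⟩ := (PySem.Int.mod_eq_zero_iff_dvd _ _).mp hmod
        have hfd : PySem.Int.floordiv (k - j*n) (n - j) = c := by
          rw [PySem.Int.floordiv_eq_iff_of_pos hdpos]
          constructor <;> nlinarith
        rw [hfd] at hlo hhi
        refine ⟨c, ?_, ?_⟩
        · rw [PySem.List.mem_pyRange_one]; exact ⟨hlo, hhi⟩
        · linear_combination -hc
    rw [if_neg hd]
    by_cases hcond : PySem.Int.mod (k - j*n) (n - j) = 0 ∧ 0 ≤ PySem.Int.floordiv (k - j*n) (n - j) ∧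
        PySem.Int.floordiv (k - j*n) (n - j) < n
    · rw [if_pos hcond, if_pos (hiff.mpr hcond)]
    · rw [if_neg hcond, if_neg (fun h => hcond (hiff.mp h)), add_zero]

-- A's while loop (with sufficient fuel) equals B's fold over the remaining range
lemma while_eq_foldl (n k : Int) (hk : k ≠ n*n) :
    ∀ (m extra : Nat) (j acc : Int), 0 ≤ j → j + (m : Int) = n + 1 →
      pvWhileA n k (m + extra) j acc =
        (PySem.List.pyRange j (n+1) 1).foldl (pvStepB n k) acc := by
  intro m
  induction m with
  | zero =>
      intro extra j acc hj0 hjm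
      have hj : j = n + 1 := by omega
      rw [PySem.List.pyRange_one_eq_nil (by omega)]
      rw [Nat.zero_add]
      cases extra with
      | zero => simp [pvWhileA]
      | succ e =>
          rw [pvWhileA]
          have hnc : ¬ (0 ≤ j ∧ j ≤ n) := by omega
          rw [if_neg hnc]
          rfl
  | succ m ih =>
      intro extra j acc hj0 hjm
      have hjn : j ≤ n := by omega
      have hfuel : m + 1 + extra = (m + extra) + 1 := by omega
      rw [hfuel]
      rw [pvWhileA]
      have hc : (0 ≤ j ∧ j ≤ n) := ⟨hj0, hjn⟩
      simp only [hc, and_self, if_true]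
      rw [PySem.List.pyRange_one_cons (by omega : j < n + 1)]
      rw [List.foldl_cons]
      rw [← step_eq n k j acc hj0 hjn hk]
      exact ih extra (j+1) _ (by omega) (by omega)

-- ===== VERDICT (by name: the statement is the Claim_ definition above) =====
theorem paintingPlan_spec : Claim_equal_paintingPlan := by
  intro n k _
  unfold Spec_paintingPlan paintingPlan paintingPlan_alt
  by_cases h1 : k < n
  · simp [h1]
  · simp only [h1, if_false]
    by_cases h2 : k = n*n
    · simp [h2]
    · simp only [h2, if_false]
      by_cases hn : 0 ≤ n
      · rw [while_eq_foldl n k h2 (n+1).toNat 1 0 0 le_rfl (by omega)]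
      · -- n < 0: loop body never runs, range empty
        have hnt : (n+1).toNat = 0 := by omega
        rw [hnt, Nat.zero_add, pvWhileA]
        have hnc : ¬ ((0:Int) ≤ 0 ∧ (0:Int) ≤ n) := by omega
        rw [if_neg hnc, PySem.List.pyRange_one_eq_nil (by omega : n + 1 ≤ 0)]
        rfl
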